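-- pv_equiv track=rewrite | github.com/nalimeitb/codingtest_Python | 프로그래머스/0/120956. 옹알이 （1）/옹알이 （1）.py | solution
-- ===== SOURCE A (Python) =====
-- def solution(babbling):
--     answer = 0
--     a = 'aya'
--     b = 'ye'
--     c = 'woo'
--     d = 'ma'
--     set1 = (a, b, c, d,
--             a+b, b+a,
--             a+c, c+a,
--             a+d, d+a,
--             b+c, c+b,
--             b+d, d+b,
--             c+d, d+c,
--             a+b+c, a+c+b, b+a+c, b+c+a, c+a+b, c+b+a,
--             a+b+d, a+d+b, b+a+d, b+d+a, d+a+b, d+b+a,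
--             a+c+d, a+d+c, c+a+d, c+d+a, d+a+c, d+c+a,
--             b+c+d, b+d+c, c+b+d, c+d+b, d+b+c, d+c+b,
--             a+b+c+d, a+b+d+c, a+c+b+d, a+c+d+b, a+d+b+c, a+d+c+b,
--            b+a+c+d, b+a+d+c, b+c+a+d, b+c+d+a, b+d+a+c, b+d+c+a,
--            c+a+b+d, c+a+d+b, c+b+a+d, c+b+d+a, c+d+a+b, c+d+b+a,
--            d+a+b+c, d+a+c+b, d+b+a+c, d+b+c+a, d+c+a+b, d+c+b+a)
--
--     count = 0
--
--     for i in babbling :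
--         if i in set1 :
--             count = count + 1
--
--     answer = count
--
--     return answer
-- ===== SOURCE B (Python) =====
-- def solution(babbling):
--     count = 0
--     for s in babbling:
--         i = 0
--         ua = uy = uw = um = False
--         ok = True
--         while i < len(s):
--             if not ua and s.startswith('aya', i):
--                 ua = True
--                 i += 3
--             elif not uy and s.startswith('ye', i):
--                 uy = True
--                 i += 2
--             elif not uw and s.startswith('woo', i):
--                 uw = True
--                 i += 3
--             elif not um and s.startswith('ma', i):
--                 um = True
--                 i += 2
--             else:
--                 ok = False
--                 break
--         if ok and s != '':
--             count += 1
--     return count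
-- ===== Notes on version B (the rewrite author's own statement) =====
-- stated objective: alternative
-- what changed: Replaces A's membership test against a precomputed tuple of all 64 token permutations with a greedy left-to-right parser that matches each of the four babbling tokens as a prefix at most once, counting fully-consumed nonempty strings.
import Mathlib
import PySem

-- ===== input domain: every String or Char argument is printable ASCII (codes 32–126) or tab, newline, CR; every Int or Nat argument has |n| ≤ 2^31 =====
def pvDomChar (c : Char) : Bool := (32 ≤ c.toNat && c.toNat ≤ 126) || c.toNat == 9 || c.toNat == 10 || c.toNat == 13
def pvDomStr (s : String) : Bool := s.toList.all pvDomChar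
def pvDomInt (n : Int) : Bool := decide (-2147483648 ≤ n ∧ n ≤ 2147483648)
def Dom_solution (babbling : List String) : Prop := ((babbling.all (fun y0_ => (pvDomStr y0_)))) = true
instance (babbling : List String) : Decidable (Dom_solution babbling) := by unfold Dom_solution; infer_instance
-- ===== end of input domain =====

-- B replaces A's membership test against a precomputed 64-permutation tuple with a
-- greedy left-to-right parser over each string maintaining four used-token flags
-- (objective: alternative).

-- ===== PORT A =====
-- Python's local tuple set1 (used only for the membership test `i in set1`)
-- is lifted to a top-level helper and ported as a List String.
def set1 : List String :=
  let a := "aya"; let b := "ye"; let c := "woo"; let d := "ma"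
  [a, b, c, d,
   a++b, b++a,
   a++c, c++a,
   a++d, d++a,
   b++c, c++b,
   b++d, d++b,
   c++d, d++c,
   a++b++c, a++c++b, b++a++c, b++c++a, c++a++b, c++b++a,
   a++b++d, a++d++b, b++a++d, b++d++a, d++a++b, d++b++a,
   a++c++d, a++d++c, c++a++d, c++d++a, d++a++c, d++c++a,
   b++c++d, b++d++c, c++b++d, c++d++b, d++b++c, d++c++b,
   a++b++c++d, a++b++d++c, a++c++b++d, a++c++d++b, a++d++b++c, a++d++c++b,
   b++a++c++d, b++a++d++c, b++c++a++d, b++c++d++a, b++d++a++c, b++d++c++a,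
   c++a++b++d, c++a++d++b, c++b++a++d, c++b++d++a, c++d++a++b, c++d++b++a,
   d++a++b++c, d++a++c++b, d++b++a++c, d++b++c++a, d++c++a++b, d++c++b++a]

def solution (babbling : List String) : Int :=
  babbling.foldl (fun count i => if i ∈ set1 then count + 1 else count) 0

-- ===== PORT B =====
-- Source B's while loop over the string index, ported with fuel = remaining length
-- (each iteration consumes at least 2 characters, so fuel = length suffices);
-- `s.startswith(t, i)` on the remaining suffix becomes `isPrefixOf`.
def parse : Nat → List Char → Bool → Bool → Bool → Bool → Bool
  | 0, l, _, _, _, _ => l.isEmpty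
  | fuel+1, l, ua, uy, uw, um =>
    if l.isEmpty then true
    else if !ua && "aya".toList.isPrefixOf l then parse fuel (l.drop 3) true uy uw um
    else if !uy && "ye".toList.isPrefixOf l then parse fuel (l.drop 2) ua true uw um
    else if !uw && "woo".toList.isPrefixOf l then parse fuel (l.drop 3) ua uy true um
    else if !um && "ma".toList.isPrefixOf l then parse fuel (l.drop 2) ua uy uw true
    else false

def solution_alt (babbling : List String) : Int :=
  babbling.foldl (fun count s =>
    if parse s.toList.length s.toList false false false false && !s.toList.isEmpty
    then count + 1 else count) 0

-- ===== PRECONDITION & SPEC =====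
def Spec_solution (babbling : List String) (out : Int) : Prop := out = solution_alt babbling
instance (babbling : List String) (out : Int) : Decidable (Spec_solution babbling out) := by unfold Spec_solution; infer_instance

-- ===== CLAIM (what is proved, stated in full; the proofs are below) =====
def Claim_equal_solution : Prop := ∀ (babbling : List String), Dom_solution babbling → Spec_solution babbling (solution babbling)

-- ===== LEMMAS AND PROOFS =====

-- All words the parser can accept from a given flag state within n matching steps.
def candsF : Nat → Bool → Bool → Bool → Bool → List (List Char)
  | 0, _, _, _, _ => [[]]
  | n+1, ua, uy, uw, um =>
    [] :: ((if ua then [] else (candsF n true uy uw um).map ("aya".toList ++ ·))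
        ++ (if uy then [] else (candsF n ua true uw um).map ("ye".toList ++ ·))
        ++ (if uw then [] else (candsF n ua uy true um).map ("woo".toList ++ ·))
        ++ (if um then [] else (candsF n ua uy uw true).map ("ma".toList ++ ·)))

-- number of still-unused flags
def fc (ua uy uw um : Bool) : Nat :=
  (cond ua 0 1) + (cond uy 0 1) + (cond uw 0 1) + (cond um 0 1)

theorem mem_cands_aya (n : Nat) (uy uw um : Bool) (r : List Char)
    (hr : r ∈ candsF n true uy uw um) :
    ("aya".toList ++ r) ∈ candsF (n+1) false uy uw um := by
  simp only [candsF, List.mem_cons, if_neg Bool.false_ne_true]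
  exact Or.inr (List.mem_append_left _ (List.mem_append_left _
    (List.mem_append_left _ (List.mem_map.mpr ⟨r, hr, rfl⟩))))

theorem mem_cands_ye (n : Nat) (ua uw um : Bool) (r : List Char)
    (hr : r ∈ candsF n ua true uw um) :
    ("ye".toList ++ r) ∈ candsF (n+1) ua false uw um := by
  simp only [candsF, List.mem_cons, if_neg Bool.false_ne_true]
  exact Or.inr (List.mem_append_left _ (List.mem_append_left _
    (List.mem_append_right _ (List.mem_map.mpr ⟨r, hr, rfl⟩))))

theorem mem_cands_woo (n : Nat) (ua uy um : Bool) (r : List Char)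
    (hr : r ∈ candsF n ua uy true um) :
    ("woo".toList ++ r) ∈ candsF (n+1) ua uy false um := by
  simp only [candsF, List.mem_cons, if_neg Bool.false_ne_true]
  exact Or.inr (List.mem_append_left _
    (List.mem_append_right _ (List.mem_map.mpr ⟨r, hr, rfl⟩)))

theorem mem_cands_ma (n : Nat) (ua uy uw : Bool) (r : List Char)
    (hr : r ∈ candsF n ua uy uw true) :
    ("ma".toList ++ r) ∈ candsF (n+1) ua uy uw false := by
  simp only [candsF, List.mem_cons, if_neg Bool.false_ne_true]
  exact Or.inr (List.mem_append_right _ (List.mem_map.mpr ⟨r, hr, rfl⟩))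

theorem mem_cands_nil (n : Nat) (ua uy uw um : Bool) :
    ([] : List Char) ∈ candsF n ua uy uw um := by
  cases n <;> simp [candsF]

theorem prefix_split {p l : List Char} (h : p.isPrefixOf l = true) :
    l = p ++ l.drop p.length := by
  obtain ⟨t, rfl⟩ := List.isPrefixOf_iff_prefix.mp h
  simp

theorem parse_sound : ∀ (fuel : Nat) (l : List Char) (ua uy uw um : Bool) (n : Nat),
    fc ua uy uw um ≤ n → parse fuel l ua uy uw um = true → l ∈ candsF n ua uy uw um := by
  intro fuel
  induction fuel with
  | zero =>
    intro l ua uy uw um n _ h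
    simp [parse] at h
    rw [h]; exact mem_cands_nil n ua uy uw um
  | succ fuel ih =>
    intro l ua uy uw um n hn h
    simp only [parse] at h
    split at h
    · rename_i he; simp at he; rw [he]; exact mem_cands_nil n ua uy uw um
    split at h
    · rename_i hc
      simp only [Bool.and_eq_true, Bool.not_eq_true'] at hc
      obtain ⟨n, rfl⟩ : ∃ m, n = m + 1 := by
        rcases n with _ | m
        · exfalso; rw [hc.1] at hn; simp [fc] at hn
        · exact ⟨m, rfl⟩
      rw [prefix_split hc.2, hc.1]
      exact mem_cands_aya n uy uw um _
        (ih _ _ _ _ _ n (by rw [hc.1] at hn; simp [fc] at hn ⊢; omega) h)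
    split at h
    · rename_i hc
      simp only [Bool.and_eq_true, Bool.not_eq_true'] at hc
      obtain ⟨n, rfl⟩ : ∃ m, n = m + 1 := by
        rcases n with _ | m
        · exfalso; rw [hc.1] at hn; cases ua <;> simp [fc] at hn
        · exact ⟨m, rfl⟩
      rw [prefix_split hc.2, hc.1]
      exact mem_cands_ye n ua uw um _
        (ih _ _ _ _ _ n (by rw [hc.1] at hn; cases ua <;> simp [fc] at hn ⊢ <;> omega) h)
    split at h
    · rename_i hc
      simp only [Bool.and_eq_true, Bool.not_eq_true'] at hc
      obtain ⟨n, rfl⟩ : ∃ m, n = m + 1 := by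
        rcases n with _ | m
        · exfalso; rw [hc.1] at hn; cases ua <;> cases uy <;> simp [fc] at hn
        · exact ⟨m, rfl⟩
      rw [prefix_split hc.2, hc.1]
      exact mem_cands_woo n ua uy um _
        (ih _ _ _ _ _ n (by rw [hc.1] at hn; cases ua <;> cases uy <;> simp [fc] at hn ⊢ <;> omega) h)
    split at h
    · rename_i hc
      simp only [Bool.and_eq_true, Bool.not_eq_true'] at hc
      obtain ⟨n, rfl⟩ : ∃ m, n = m + 1 := by
        rcases n with _ | m
        · exfalso; rw [hc.1] at hn; cases ua <;> cases uy <;> cases uw <;> simp [fc] at hn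
        · exact ⟨m, rfl⟩
      rw [prefix_split hc.2, hc.1]
      exact mem_cands_ma n ua uy uw _
        (ih _ _ _ _ _ n (by rw [hc.1] at hn; cases ua <;> cases uy <;> cases uw <;> simp [fc] at hn ⊢ <;> omega) h)
    · exact absurd h (by simp)

theorem cands4_in_set1 : ∀ l ∈ candsF 4 false false false false,
    l ≠ [] → String.ofList l ∈ set1 := by decide

theorem set1_parses : ∀ s ∈ set1,
    (parse s.toList.length s.toList false false false false && !s.toList.isEmpty) = true := by
  decide

theorem key (s : String) :
    (s ∈ set1) ↔ (parse s.toList.length s.toList false false false false && !s.toList.isEmpty) = true := by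
  constructor
  · exact set1_parses s
  · intro h
    simp only [Bool.and_eq_true, Bool.not_eq_true'] at h
    have hm := parse_sound s.toList.length s.toList false false false false 4
      (by simp [fc]) h.1
    have hne : s.toList ≠ [] := by
      intro he; rw [he] at h; simp at h
    have := cands4_in_set1 s.toList hm hne
    rwa [String.ofList_toList] at this

-- ===== VERDICT (by name: the statement is the Claim_ definition above) =====
theorem solution_spec : Claim_equal_solution := by
  intro babbling _
  unfold Spec_solution solution solution_alt
  have hf : (fun (count : Int) (i : String) => if i ∈ set1 then count + 1 else count)
      = (fun (count : Int) (s : String) =>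
          if parse s.toList.length s.toList false false false false && !s.toList.isEmpty
          then count + 1 else count) := by
    funext count s
    by_cases h : s ∈ set1
    · rw [if_pos h, if_pos ((key s).mp h)]
    · rw [if_neg h, if_neg (fun hb => h ((key s).mpr hb))]
  rw [hf]
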